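-- pv_equiv track=rewrite | github.com/veins/space_veins | scripts/convertSumoObjects.py | findMinCoord
-- ===== SOURCE A (Python) =====
-- def findMinCoord(objects):
--     minCoord = [5000000000, 5000000000]
--
--     tempCoord = [0, 0]
--     for i in range(len(objects)):
--         if (i % 2 != 0):
--             if (objects[i] < minCoord[1]):
--                 minCoord[1] = objects[i]
--         else:
--             if (objects[i] < minCoord[0]):
--                 minCoord[0] = objects[i]
--     minCoord.append(0)
--
--     return minCoord
-- ===== SOURCE B (Python) =====
-- def findMinCoord(objects):
--     # Two parity minima via slicing; the sentinel is folded into each reduction.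
--     return [min(list(objects[0::2]) + [5000000000]),
--             min(list(objects[1::2]) + [5000000000]),
--             0]
-- ===== Notes on version B (the rewrite author's own statement) =====
-- stated objective: simpler
-- what changed: Replaces the index loop with parity branching and in-place list updates by two slice-based min reductions (objects[0::2] and objects[1::2]) with the 5000000000 sentinel folded into each min.
import Mathlib
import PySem

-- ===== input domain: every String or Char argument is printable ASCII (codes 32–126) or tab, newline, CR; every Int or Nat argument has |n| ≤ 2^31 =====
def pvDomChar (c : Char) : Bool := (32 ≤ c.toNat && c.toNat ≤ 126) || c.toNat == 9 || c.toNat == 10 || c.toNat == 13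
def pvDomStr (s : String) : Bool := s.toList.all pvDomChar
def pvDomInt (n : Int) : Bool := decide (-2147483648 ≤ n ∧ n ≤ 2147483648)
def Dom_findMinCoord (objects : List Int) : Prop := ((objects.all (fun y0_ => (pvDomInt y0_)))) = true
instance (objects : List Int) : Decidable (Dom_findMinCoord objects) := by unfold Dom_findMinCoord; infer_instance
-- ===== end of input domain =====

-- B replaces A's index loop with parity branching by two slice-based min reductions; objective: simpler.

-- ===== PORT A =====
def findMinCoord (objects : List Int) : List Int :=
  let minCoord : List Int := [5000000000, 5000000000]
  let minCoord :=
    (PySem.List.pyRange 0 (PySem.List.len objects) 1).foldl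
      (fun mc i =>
        if PySem.Int.mod i 2 ≠ 0 then
          if PySem.List.pyGetD objects i 0 < PySem.List.pyGetD mc 1 0 then
            PySem.List.pySetD mc 1 (PySem.List.pyGetD objects i 0)
          else mc
        else
          if PySem.List.pyGetD objects i 0 < PySem.List.pyGetD mc 0 0 then
            PySem.List.pySetD mc 0 (PySem.List.pyGetD objects i 0)
          else mc)
      minCoord
  minCoord ++ [0]

-- ===== PORT B =====
-- xs[0::2] (every second element from the head); step-2 slicing is ported by hand
-- (exact: keep the head, skip one, recurse), since PySem.List.slice has no step argument.
def pvEvery2 : List Int → List Int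
  | [] => []
  | [x] => [x]
  | x :: _ :: t => x :: pvEvery2 t

-- min(l) of a nonempty list (in B, l always ends with the sentinel, so [] is unreachable)
def pvMin : List Int → Int
  | [] => 0
  | x :: t => t.foldl min x

def findMinCoord_alt (objects : List Int) : List Int :=
  [pvMin (pvEvery2 objects ++ [5000000000]),
   pvMin (pvEvery2 (objects.drop 1) ++ [5000000000]),
   0]

-- ===== PRECONDITION & SPEC =====
def Spec_findMinCoord (objects : List Int) (out : List Int) : Prop := out = findMinCoord_alt objects
instance (objects : List Int) (out : List Int) : Decidable (Spec_findMinCoord objects out) := by unfold Spec_findMinCoord; infer_instance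

-- ===== CLAIM (what is proved, stated in full; the proofs are below) =====
def Claim_equal_findMinCoord : Prop := ∀ (objects : List Int), Dom_findMinCoord objects → Spec_findMinCoord objects (findMinCoord objects)

-- ===== LEMMAS AND PROOFS =====

theorem pvEvery2_cons (x : Int) (t : List Int) :
    pvEvery2 (x :: t) = x :: pvEvery2 t.tail := by
  cases t <;> simp [pvEvery2]

-- folding min over l ++ [c] from a equals folding from min a c
theorem foldl_min_append_singleton (l : List Int) (a c : Int) :
    (l ++ [c]).foldl min a = l.foldl min (min a c) := by
  induction l generalizing a with
  | nil => simp
  | cons x t ih =>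
      simp only [List.cons_append, List.foldl_cons, ih]
      rw [min_right_comm]

theorem pvMin_append_sentinel (l : List Int) (c : Int) :
    pvMin (l ++ [c]) = l.foldl min c := by
  cases l with
  | nil => simp [pvMin]
  | cons x t =>
      simp only [List.cons_append, pvMin, foldl_min_append_singleton, List.foldl_cons]
      rw [min_comm]

-- the step function of A's loop
def pvStep (objects : List Int) (mc : List Int) (i : Int) : List Int :=
  if PySem.Int.mod i 2 ≠ 0 then
    if PySem.List.pyGetD objects i 0 < PySem.List.pyGetD mc 1 0 then
      PySem.List.pySetD mc 1 (PySem.List.pyGetD objects i 0)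
    else mc
  else
    if PySem.List.pyGetD objects i 0 < PySem.List.pyGetD mc 0 0 then
      PySem.List.pySetD mc 0 (PySem.List.pyGetD objects i 0)
    else mc

theorem pvStep_two (ys : List Int) (k : Nat) (hk : k < ys.length) (a b : Int) :
    pvStep ys [a, b] (k : Int) =
      if k % 2 = 0 then [min a ys[k], b] else [a, min b ys[k]] := by
  have hget : PySem.List.pyGetD ys (k : Int) 0 = ys[k] := by
    simp [PySem.List.pyGetD_natCast, hk]
  unfold pvStep
  rw [hget]
  have hmod : PySem.Int.mod (k : Int) 2 = ((k % 2 : Nat) : Int) := by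
    exact_mod_cast PySem.Int.mod_natCast k 2
  rw [hmod]
  rcases Nat.mod_two_eq_zero_or_one k with h | h <;>
    simp [h, PySem.List.pyGetD, PySem.List.pyGet?, PySem.List.pyIdx?,
          PySem.List.pySetD, PySem.List.pySet?, min_def] <;>
    split_ifs <;> simp_all <;> omega

-- A's loop from index k computes the parity minima of ys.drop k, folded onto [a, b]
theorem pv_loop_eq (ys : List Int) (k : Nat) (l : List Int) (hl : ys.drop k = l) (a b : Int) :
    (PySem.List.pyRange (k : Int) (PySem.List.len ys) 1).foldl (pvStep ys) [a, b] =
      if k % 2 = 0 then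
        [(pvEvery2 l).foldl min a, (pvEvery2 l.tail).foldl min b]
      else
        [(pvEvery2 l.tail).foldl min a, (pvEvery2 l).foldl min b] := by
  induction l generalizing k a b with
  | nil =>
      have hk : ys.length ≤ k := List.drop_eq_nil_iff.mp hl
      have hr : PySem.List.pyRange (k : Int) (PySem.List.len ys) 1 = [] := by
        rw [PySem.List.pyRange_one]
        simp
        omega
      rw [hr]
      split <;> simp [pvEvery2]
  | cons x t ih =>
      have hk : k < ys.length := by
        by_contra h
        rw [List.drop_eq_nil_of_le (by omega)] at hl
        simp at hl
      have hsplit := (List.getElem_cons_drop (as := ys) (i := k) hk).trans hl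
      have hxk : ys[k] = x := ((List.cons.injEq _ _ _ _).mp hsplit).1
      have ht : ys.drop (k + 1) = t := ((List.cons.injEq _ _ _ _).mp hsplit).2
      have hlt : (k : Int) < PySem.List.len ys := by
        simp only [PySem.List.len]; omega
      rw [PySem.List.pyRange_one_cons hlt]
      simp only [List.foldl_cons]
      rw [pvStep_two ys k hk a b, hxk]
      have hcast : (k : Int) + 1 = ((k + 1 : Nat) : Int) := by push_cast; ring
      rcases Nat.mod_two_eq_zero_or_one k with h | h
      · have h1 : (k + 1) % 2 = 1 := by omega
        have ih' := ih (k + 1) ht (min a x) b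
        rw [← hcast, if_neg (by omega)] at ih'
        rw [if_pos h, if_pos h, ih']
        simp [pvEvery2_cons, List.tail_cons]
      · have h1 : (k + 1) % 2 = 0 := by omega
        have ih' := ih (k + 1) ht a (min b x)
        rw [← hcast, if_pos h1] at ih'
        rw [if_neg (by omega), if_neg (by omega), ih']
        simp [pvEvery2_cons, List.tail_cons]

-- ===== VERDICT (by name: the statement is the Claim_ definition above) =====
theorem findMinCoord_spec : Claim_equal_findMinCoord := by
  intro objects _
  show findMinCoord objects = findMinCoord_alt objects
  unfold findMinCoord findMinCoord_alt
  have h := pv_loop_eq objects 0 objects rfl 5000000000 5000000000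
  simp only [Nat.cast_zero, Nat.zero_mod] at h
  have hfold :
      (fun (mc : List Int) (i : Int) =>
        if PySem.Int.mod i 2 ≠ 0 then
          if PySem.List.pyGetD objects i 0 < PySem.List.pyGetD mc 1 0 then
            PySem.List.pySetD mc 1 (PySem.List.pyGetD objects i 0)
          else mc
        else
          if PySem.List.pyGetD objects i 0 < PySem.List.pyGetD mc 0 0 then
            PySem.List.pySetD mc 0 (PySem.List.pyGetD objects i 0)
          else mc) = pvStep objects := by
    funext mc i; rfl
  simp only [hfold]
  rw [h, pvMin_append_sentinel, pvMin_append_sentinel]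
  simp [List.drop_one]
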